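-- pv_equiv track=rewrite | github.com/caleb-james-smith/AlgoExpert | python/test_2048.py | update_values_left
-- ===== SOURCE A (Python) =====
-- def value_is_in_between(array, i, j):
--     for index in range(i + 1, j):
--         if array[index] > 0:
--             return True
--     return False
--
-- def update_values_left(array):
--     n = len(array)
--     output = array.copy()
--     for i in range(n - 1):
--         for j in range(i + 1, n):
--             x = output[i]
--             y = output[j]
--             # require that x and y are nonzero and equal
--             if x > 0 and y > 0 and x == y:
--                 val_in_between = value_is_in_between(array, i, j)
--                 if not val_in_between:
--                     output[i] = x + y
--                     output[j] = 0
--     return output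
-- ===== SOURCE B (Python) =====
-- def update_values_left(array):
--     # Single pass: merge consecutive positive entries (ignoring gaps of
--     # non-positive entries) when equal, in place.
--     output = list(array)
--     pos = [i for i, v in enumerate(array) if v > 0]
--     k = 0
--     while k + 1 < len(pos):
--         i, j = pos[k], pos[k + 1]
--         if output[i] == output[j]:
--             output[i] += output[j]
--             output[j] = 0
--             k += 2
--         else:
--             k += 1
--     return output
-- ===== Notes on version B (the rewrite author's own statement) =====
-- stated objective: faster
-- what changed: Replaces the O(n^2) pair loop with its O(n) in-between rescans by one precomputed list of positive positions walked once left-to-right, greedily merging consecutive equal entries in place.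
import Mathlib
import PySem

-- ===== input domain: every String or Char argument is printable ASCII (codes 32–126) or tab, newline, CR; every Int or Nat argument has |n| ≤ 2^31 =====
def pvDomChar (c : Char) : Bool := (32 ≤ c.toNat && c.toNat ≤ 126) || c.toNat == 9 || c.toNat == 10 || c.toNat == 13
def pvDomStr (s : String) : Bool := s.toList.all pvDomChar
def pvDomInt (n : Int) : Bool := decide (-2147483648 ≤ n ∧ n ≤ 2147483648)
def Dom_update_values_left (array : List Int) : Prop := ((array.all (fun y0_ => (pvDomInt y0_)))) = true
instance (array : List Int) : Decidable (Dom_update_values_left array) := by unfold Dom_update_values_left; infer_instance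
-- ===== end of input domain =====

-- B replaces A's O(n^2) pair loop (with an O(n) in-between rescan inside) by one
-- precomputed list of positive positions walked once, merging consecutive equal
-- entries greedily (objective: faster; return value only, A does not mutate its argument).

-- ===== PORT A =====
-- Python's early-return scan 'for index in range(i+1, j): if array[index] > 0: return True'
-- is ported as .any over the same range (exact: indices produced by the callers are in range,
-- so pyGetD's default is never used).
def value_is_in_between (array : List Int) (i j : Int) : Bool :=
  (PySem.List.pyRange (i + 1) j 1).any (fun index => decide (0 < PySem.List.pyGetD array index 0))

def update_values_left (array : List Int) : List Int :=
  let n : Int := (array.length : Int)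
  (PySem.List.pyRange 0 (n - 1) 1).foldl (fun output i =>
    (PySem.List.pyRange (i + 1) n 1).foldl (fun output j =>
      let x := PySem.List.pyGetD output i 0
      let y := PySem.List.pyGetD output j 0
      if 0 < x ∧ 0 < y ∧ x = y then
        if value_is_in_between array i j then output
        else PySem.List.pySetD (PySem.List.pySetD output i (x + y)) j 0
      else output) output) array

-- ===== PORT B =====
-- the 'while k + 1 < len(pos)' loop of Source B: the suffix pos[k:] is the argument
def altGo (output : List Int) (ps : List Int) : List Int :=
  match ps with
  | i :: j :: rest =>
      if PySem.List.pyGetD output i 0 = PySem.List.pyGetD output j 0 then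
        altGo (PySem.List.pySetD (PySem.List.pySetD output i
                 (PySem.List.pyGetD output i 0 + PySem.List.pyGetD output j 0)) j 0) rest
      else altGo output (j :: rest)
  | _ => output
termination_by ps.length
decreasing_by all_goals simp

def update_values_left_alt (array : List Int) : List Int :=
  let pos : List Int := ((PySem.List.enumerate array 0).filter (fun p => decide (0 < p.2))).map (fun p => p.1)
  altGo array pos

-- ===== PRECONDITION & SPEC =====
def Spec_update_values_left (array : List Int) (out : List Int) : Prop := out = update_values_left_alt array
instance (array : List Int) (out : List Int) : Decidable (Spec_update_values_left array out) := by unfold Spec_update_values_left; infer_instance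

-- ===== CLAIM (what is proved, stated in full; the proofs are below) =====
def Claim_equal_update_values_left : Prop := ∀ (array : List Int), Dom_update_values_left array → Spec_update_values_left array (update_values_left array)

-- ===== LEMMAS AND PROOFS =====

-- A's inner-loop body and outer-loop body, named for the proofs (definitionally the port's lambdas)
def Ibody (array : List Int) (i : Int) (output : List Int) (j : Int) : List Int :=
  let x := PySem.List.pyGetD output i 0
  let y := PySem.List.pyGetD output j 0
  if 0 < x ∧ 0 < y ∧ x = y then
    if value_is_in_between array i j then output
    else PySem.List.pySetD (PySem.List.pySetD output i (x + y)) j 0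
  else output

def Abody (array : List Int) (output : List Int) (i : Int) : List Int :=
  (PySem.List.pyRange (i + 1) (array.length : Int) 1).foldl (Ibody array i) output

lemma update_values_left_eq (array : List Int) :
    update_values_left array
      = (PySem.List.pyRange 0 ((array.length : Int) - 1) 1).foldl (Abody array) array := rfl

-- a fold whose body fixes the accumulator does nothing
lemma foldl_fixed {α β : Type} (f : β → α → β) (js : List α) (out : β)
    (h : ∀ j ∈ js, f out j = out) : js.foldl f out = out := by
  induction js with
  | nil => rfl
  | cons j js ih =>
      simp only [List.foldl_cons, h j (by simp)]
      exact ih (fun x hx => h x (by simp [hx]))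

lemma getD_setD (out : List Int) (i j v d : Int)
    (hi : 0 ≤ i) (_hi2 : i < (out.length : Int)) (hj : 0 ≤ j) (hj2 : j < (out.length : Int)) :
    PySem.List.pyGetD (PySem.List.pySetD out i v) j d
      = if j = i then v else PySem.List.pyGetD out j d := by
  rw [PySem.List.pySetD_of_nonneg out v hi,
      PySem.List.pyGetD_eq_getElem (out.set i.toNat v) d hj (by simpa using hj2),
      List.getElem_set]
  by_cases h : j = i
  · simp [h]
  · have : i.toNat ≠ j.toNat := by omega
    simp [this, h, PySem.List.pyGetD_eq_getElem out d hj hj2]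

-- the state invariant before outer iteration m: ps is the suffix of positive positions not yet consumed
def StInv (array : List Int) (m : Int) (out ps : List Int) : Prop :=
  out.length = array.length ∧
  ps.Pairwise (· < ·) ∧
  (∀ p ∈ ps, m ≤ p ∧ p < (array.length : Int) ∧ 0 < PySem.List.pyGetD array p 0) ∧
  (∀ j : Int, m ≤ j → j < (array.length : Int) → (∀ p ∈ ps, j < p) → PySem.List.pyGetD out j 0 ≤ 0) ∧
  (∀ j : Int, 0 ≤ j → j < (array.length : Int) → (∃ p ∈ ps, p ≤ j) → PySem.List.pyGetD out j 0 = PySem.List.pyGetD array j 0) ∧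
  (∀ j : Int, m ≤ j → j < (array.length : Int) → 0 < PySem.List.pyGetD array j 0 → j ∈ ps ∨ PySem.List.pyGetD out j 0 = 0)

lemma inner_noop_x (array : List Int) (m : Int) (out : List Int)
    (hx : PySem.List.pyGetD out m 0 ≤ 0) : Abody array out m = out := by
  apply foldl_fixed
  intro j _
  simp only [Ibody]
  have : ¬ (0 < PySem.List.pyGetD out m 0 ∧ 0 < PySem.List.pyGetD out j 0 ∧
      PySem.List.pyGetD out m 0 = PySem.List.pyGetD out j 0) := by
    rintro ⟨h1, -, -⟩; omega
  simp [this]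

lemma inner_noop_y (array : List Int) (m : Int) (out : List Int)
    (hy : ∀ j : Int, m < j → j < (array.length : Int) → PySem.List.pyGetD out j 0 ≤ 0) :
    Abody array out m = out := by
  apply foldl_fixed
  intro j hj
  rw [PySem.List.mem_pyRange_one] at hj
  simp only [Ibody]
  have : ¬ (0 < PySem.List.pyGetD out m 0 ∧ 0 < PySem.List.pyGetD out j 0 ∧
      PySem.List.pyGetD out m 0 = PySem.List.pyGetD out j 0) := by
    rintro ⟨-, h2, -⟩
    exact absurd h2 (by have := hy j (by omega) (by omega); omega)
  simp [this]

lemma altGo_nil (output : List Int) : altGo output [] = output := by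
  simp [altGo]

lemma altGo_single (output : List Int) (i : Int) : altGo output [i] = output := by
  simp [altGo]

lemma altGo_cons2 (output : List Int) (i j : Int) (rest : List Int) :
    altGo output (i :: j :: rest)
      = if PySem.List.pyGetD output i 0 = PySem.List.pyGetD output j 0 then
          altGo (PySem.List.pySetD (PySem.List.pySetD output i
                   (PySem.List.pyGetD output i 0 + PySem.List.pyGetD output j 0)) j 0) rest
        else altGo output (j :: rest) := by
  rw [altGo]

lemma vib_true_of (array : List Int) (m q j : Int) (hmq : m < q) (hqj : q < j)
    (haq : 0 < PySem.List.pyGetD array q 0) : value_is_in_between array m j = true := by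
  simp only [value_is_in_between, List.any_eq_true]
  exact ⟨q, by rw [PySem.List.mem_pyRange_one]; omega, by simpa using haq⟩

lemma Ibody_of_vib (array : List Int) (m j : Int) (o : List Int)
    (hvib : value_is_in_between array m j = true) : Ibody array m o j = o := by
  simp [Ibody, hvib]

lemma inner_merge (array : List Int) (m q : Int) (out : List Int)
    (hlen : out.length = array.length)
    (_h0m : 0 ≤ m) (hmq : m < q) (hqN : q < (array.length : Int))
    (hv : 0 < PySem.List.pyGetD out m 0) (hw : 0 < PySem.List.pyGetD out q 0)
    (hbet : ∀ j : Int, m < j → j < q → PySem.List.pyGetD array j 0 ≤ 0 ∧ PySem.List.pyGetD out j 0 ≤ 0)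
    (haq : 0 < PySem.List.pyGetD array q 0) :
    Abody array out m
      = if PySem.List.pyGetD out m 0 = PySem.List.pyGetD out q 0 then
          PySem.List.pySetD (PySem.List.pySetD out m
            (PySem.List.pyGetD out m 0 + PySem.List.pyGetD out q 0)) q 0
        else out := by
  have hN : (array.length : Int) = (out.length : Int) := by rw [hlen]
  rw [Abody, PySem.List.pyRange_one_append (m+1) q (array.length : Int) (by omega) (by omega),
      PySem.List.pyRange_one_cons (show q < (array.length : Int) by omega), List.foldl_append]
  have hseg1 : (PySem.List.pyRange (m+1) q).foldl (Ibody array m) out = out := by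
    apply foldl_fixed
    intro j hj
    rw [PySem.List.mem_pyRange_one] at hj
    have hy := (hbet j (by omega) (by omega)).2
    simp only [Ibody]
    have : ¬ (0 < PySem.List.pyGetD out m 0 ∧ 0 < PySem.List.pyGetD out j 0 ∧
        PySem.List.pyGetD out m 0 = PySem.List.pyGetD out j 0) := by
      rintro ⟨-, h2, -⟩; omega
    simp [this]
  rw [hseg1, List.foldl_cons]
  by_cases heq : PySem.List.pyGetD out m 0 = PySem.List.pyGetD out q 0
  · -- merge fires at q, then every later j is blocked by the positive array[q] in between
    have hvibq : value_is_in_between array m q = false := by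
      simp only [value_is_in_between, List.any_eq_false]
      intro j hj
      rw [PySem.List.mem_pyRange_one] at hj
      have := (hbet j (by omega) (by omega)).1
      simp; omega
    have hbody : Ibody array m out q
        = PySem.List.pySetD (PySem.List.pySetD out m
            (PySem.List.pyGetD out m 0 + PySem.List.pyGetD out q 0)) q 0 := by
      simp only [Ibody]
      rw [if_pos ⟨hv, hw, heq⟩, hvibq]
      simp
    rw [hbody, if_pos heq]
    apply foldl_fixed
    intro j hj
    rw [PySem.List.mem_pyRange_one] at hj
    exact Ibody_of_vib array m j _ (vib_true_of array m q j hmq (by omega) haq)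
  · -- no merge at q (values differ), and every later j is likewise blocked
    have hbody : Ibody array m out q = out := by
      simp only [Ibody]
      have : ¬ (0 < PySem.List.pyGetD out m 0 ∧ 0 < PySem.List.pyGetD out q 0 ∧
          PySem.List.pyGetD out m 0 = PySem.List.pyGetD out q 0) := by
        rintro ⟨-, -, h3⟩; exact heq h3
      simp [this]
    rw [hbody, if_neg heq]
    apply foldl_fixed
    intro j hj
    rw [PySem.List.mem_pyRange_one] at hj
    exact Ibody_of_vib array m j _ (vib_true_of array m q j hmq (by omega) haq)

-- the main induction: running A's remaining outer iterations from a state satisfying Inv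
-- yields exactly B's greedy pass over the remaining positions
lemma main_lemma (array : List Int) : ∀ (k : Nat) (m : Int) (out ps : List Int),
    ((array.length : Int) - 1 - m).toNat = k → 0 ≤ m → StInv array m out ps →
    (PySem.List.pyRange m ((array.length : Int) - 1) 1).foldl (Abody array) out = altGo out ps := by
  intro k
  induction k with
  | zero =>
    intro m out ps hk hm hinv
    obtain ⟨hlen, hpw, hmem, hbelow, hagree, hcover⟩ := hinv
    rw [PySem.List.pyRange_one_eq_nil (by omega), List.foldl_nil]
    rcases ps with _ | ⟨p, _ | ⟨q, t⟩⟩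
    · exact (altGo_nil out).symm
    · exact (altGo_single out p).symm
    · exfalso
      have hp := hmem p (by simp)
      have hq := hmem q (by simp)
      have hpq : p < q := (List.pairwise_cons.mp hpw).1 q (by simp)
      omega
  | succ k ih =>
    intro m out ps hk hm hinv
    obtain ⟨hlen, hpw, hmem, hbelow, hagree, hcover⟩ := hinv
    have hmN : m < (array.length : Int) - 1 := by omega
    rw [PySem.List.pyRange_one_cons hmN, List.foldl_cons]
    rcases ps with _ | ⟨p, rest⟩
    · -- no positions left: this iteration does nothing
      have hskip : Abody array out m = out :=
        inner_noop_x array m out (hbelow m le_rfl (by omega) (by simp))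
      rw [hskip, altGo_nil,
          ih (m+1) out [] (by omega) (by omega)
            ⟨hlen, hpw, by simp, fun j hj1 hj2 hj3 => hbelow j (by omega) hj2 hj3, hagree,
             fun j hj1 hj2 hj3 => hcover j (by omega) hj2 hj3⟩,
          altGo_nil]
    · have hp := hmem p (by simp)
      rcases lt_or_eq_of_le hp.1 with hmp | hmp
      · -- m is below the next position: this iteration does nothing
        have hall : ∀ p' ∈ p :: rest, m < p' := by
          intro p' hp'
          rcases List.mem_cons.mp hp' with rfl | hp'
          · exact hmp
          · exact lt_trans hmp ((List.pairwise_cons.mp hpw).1 p' hp')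
        have hskip : Abody array out m = out :=
          inner_noop_x array m out (hbelow m le_rfl (by omega) hall)
        rw [hskip]
        exact ih (m+1) out (p :: rest) (by omega) (by omega)
          ⟨hlen, hpw,
           fun p' hp' => ⟨by have := hall p' hp'; omega, (hmem p' hp').2.1, (hmem p' hp').2.2⟩,
           fun j hj1 => hbelow j (by omega),
           hagree,
           fun j hj1 => hcover j (by omega)⟩
      · subst hmp
        rcases rest with _ | ⟨q, t⟩
        · -- lone last position m: nothing to its right is positive
          have hnop : ∀ j : Int, m < j → j < (array.length : Int) →
              PySem.List.pyGetD out j 0 ≤ 0 := by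
            intro j hj1 hj2
            by_cases ha : 0 < PySem.List.pyGetD array j 0
            · rcases hcover j (by omega) hj2 ha with hin | hz
              · rcases List.mem_cons.mp hin with rfl | hin
                · omega
                · simp at hin
              · omega
            · have := hagree j (by omega) hj2 ⟨m, by simp, by omega⟩
              omega
          rw [inner_noop_y array m out hnop, altGo_single,
              ih (m+1) out [] (by omega) (by omega)
                ⟨hlen, List.Pairwise.nil, by simp,
                 fun j hj1 hj2 _ => hnop j (by omega) hj2,
                 fun j _ _ h => absurd h (by simp),
                 ?_⟩,
              altGo_nil]
          intro j hj1 hj2 ha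
          rcases hcover j (by omega) hj2 ha with hin | hz
          · rcases List.mem_cons.mp hin with rfl | hin
            · omega
            · simp at hin
          · exact Or.inr hz
        · -- head position is m with a next position q: the greedy step happens here
          have hq := hmem q (by simp)
          have hmq : m < q := (List.pairwise_cons.mp hpw).1 q (by simp)
          have hv : PySem.List.pyGetD out m 0 = PySem.List.pyGetD array m 0 :=
            hagree m (by omega) (by omega) ⟨m, by simp, le_rfl⟩
          have hvpos : 0 < PySem.List.pyGetD out m 0 := by rw [hv]; exact hp.2.2
          have hwq : PySem.List.pyGetD out q 0 = PySem.List.pyGetD array q 0 :=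
            hagree q (by omega) hq.2.1 ⟨m, by simp, by omega⟩
          have hwpos : 0 < PySem.List.pyGetD out q 0 := by rw [hwq]; exact hq.2.2
          have htgt : ∀ p' ∈ t, q < p' :=
            fun p' hp' => (List.pairwise_cons.mp (List.pairwise_cons.mp hpw).2).1 p' hp'
          have hbet : ∀ j : Int, m < j → j < q →
              PySem.List.pyGetD array j 0 ≤ 0 ∧ PySem.List.pyGetD out j 0 ≤ 0 := by
            intro j hj1 hj2
            have hjN : j < (array.length : Int) := by omega
            have harr : PySem.List.pyGetD array j 0 ≤ 0 := by
              by_contra ha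
              rcases hcover j (by omega) hjN (by omega) with hin | hz
              · rcases List.mem_cons.mp hin with rfl | hin
                · omega
                rcases List.mem_cons.mp hin with rfl | hin
                · omega
                · exact absurd (htgt j hin) (by omega)
              · have := hagree j (by omega) hjN ⟨m, by simp, by omega⟩
                omega
            exact ⟨harr, by have := hagree j (by omega) hjN ⟨m, by simp, by omega⟩; omega⟩
          rw [inner_merge array m q out hlen hm hmq hq.2.1 hvpos hwpos hbet hq.2.2,
              altGo_cons2]
          by_cases heq : PySem.List.pyGetD out m 0 = PySem.List.pyGetD out q 0
          · rw [if_pos heq, if_pos heq]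
            set out' := PySem.List.pySetD (PySem.List.pySetD out m
                (PySem.List.pyGetD out m 0 + PySem.List.pyGetD out q 0)) q 0 with hout'def
            have hlen' : out'.length = array.length := by
              rw [hout'def, PySem.List.length_pySetD, PySem.List.length_pySetD]
              exact hlen
            have hget' : ∀ j : Int, 0 ≤ j → j < (array.length : Int) →
                PySem.List.pyGetD out' j 0
                  = if j = q then 0
                    else if j = m then PySem.List.pyGetD out m 0 + PySem.List.pyGetD out q 0
                    else PySem.List.pyGetD out j 0 := by
              intro j hj0 hj1
              rw [hout'def,
                  getD_setD _ q j _ _ (by omega)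
                    (by rw [PySem.List.length_pySetD, hlen]; omega) hj0
                    (by rw [PySem.List.length_pySetD, hlen]; omega)]
              by_cases hjq : j = q
              · simp [hjq]
              · rw [if_neg hjq,
                    getD_setD out m j _ _ (by omega) (by rw [hlen]; omega) hj0
                      (by rw [hlen]; omega), if_neg hjq]
            have hinv' : StInv array (m+1) out' t := by
              refine ⟨hlen', (List.pairwise_cons.mp (List.pairwise_cons.mp hpw).2).2,
                ?_, ?_, ?_, ?_⟩
              · intro p' hp'
                have h1 := htgt p' hp'
                have h2 := hmem p' (by simp [hp'])
                exact ⟨by omega, h2.2.1, h2.2.2⟩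
              · intro j hj1 hj2 hj3
                rw [hget' j (by omega) hj2]
                by_cases hjq : j = q
                · simp [hjq]
                · rw [if_neg hjq, if_neg (by omega : ¬ (j = m))]
                  rcases lt_trichotomy j q with h | h | h
                  · exact (hbet j (by omega) h).2
                  · exact absurd h hjq
                  · by_cases ha : 0 < PySem.List.pyGetD array j 0
                    · rcases hcover j (by omega) hj2 ha with hin | hz
                      · rcases List.mem_cons.mp hin with rfl | hin
                        · omega
                        rcases List.mem_cons.mp hin with rfl | hin
                        · omega
                        · exact absurd (hj3 j hin) (lt_irrefl j)
                      · omega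
                    · have := hagree j (by omega) hj2 ⟨m, by simp, by omega⟩
                      omega
              · intro j hj0 hj1 hex
                rcases hex with ⟨p', hp', hple⟩
                have hqp' := htgt p' hp'
                rw [hget' j hj0 hj1, if_neg (by omega : ¬ (j = q)),
                    if_neg (by omega : ¬ (j = m))]
                exact hagree j hj0 hj1 ⟨p', by simp [hp'], hple⟩
              · intro j hj1 hj2 ha
                by_cases hjq : j = q
                · right; rw [hget' j (by omega) hj2]; simp [hjq]
                · rcases hcover j (by omega) hj2 ha with hin | hz
                  · rcases List.mem_cons.mp hin with rfl | hin
                    · omega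
                    rcases List.mem_cons.mp hin with rfl | hin
                    · exact absurd rfl hjq
                    · exact Or.inl hin
                  · right
                    rw [hget' j (by omega) hj2, if_neg hjq, if_neg (by omega : ¬ (j = m))]
                    exact hz
            exact ih (m+1) out' t (by omega) (by omega) hinv'
          · rw [if_neg heq, if_neg heq]
            have hinv' : StInv array (m+1) out (q :: t) := by
              refine ⟨hlen, (List.pairwise_cons.mp hpw).2, ?_, ?_, ?_, ?_⟩
              · intro p' hp'
                rcases List.mem_cons.mp hp' with rfl | hp'
                · exact ⟨by omega, hq.2.1, hq.2.2⟩
                · have h1 := htgt p' hp'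
                  have h2 := hmem p' (by simp [hp'])
                  exact ⟨by omega, h2.2.1, h2.2.2⟩
              · intro j hj1 hj2 hj3
                have hjq : j < q := hj3 q (by simp)
                exact (hbet j (by omega) hjq).2
              · intro j hj0 hj1 hex
                rcases hex with ⟨p', hp', hple⟩
                exact hagree j hj0 hj1 ⟨p', by simp [hp'], hple⟩
              · intro j hj1 hj2 ha
                rcases hcover j (by omega) hj2 ha with hin | hz
                · rcases List.mem_cons.mp hin with rfl | hin
                  · omega
                  · exact Or.inl hin
                · exact Or.inr hz
            exact ih (m+1) out (q :: t) (by omega) (by omega) hinv'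

lemma init_inv (array : List Int) :
    StInv array 0 array (((PySem.List.enumerate array 0).filter (fun p => decide (0 < p.2))).map (fun p => p.1)) := by
  have hmem : ∀ x : Int,
      x ∈ ((PySem.List.enumerate array 0).filter (fun p => decide (0 < p.2))).map (fun p => p.1)
      ↔ 0 ≤ x ∧ x < (array.length : Int) ∧ 0 < PySem.List.pyGetD array x 0 := by
    intro x
    constructor
    · rintro hx
      rcases List.mem_map.mp hx with ⟨p, hp, rfl⟩
      rcases List.mem_filter.mp hp with ⟨hpe, hpos⟩
      rcases (PySem.List.mem_enumerate_iff array 0 p).mp hpe with ⟨k, hk, rfl⟩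
      simp only [decide_eq_true_eq] at hpos
      refine ⟨by simp, by simp; omega, ?_⟩
      have : ((0 : Int) + (k : Int)) = (k : Int) := by omega
      rw [this, PySem.List.pyGetD_natCast, List.getD_eq_getElem _ _ hk]
      exact hpos
    · rintro ⟨h0, h1, h2⟩
      apply List.mem_map.mpr
      refine ⟨(x, array[x.toNat]'(by omega)), ?_, rfl⟩
      apply List.mem_filter.mpr
      refine ⟨(PySem.List.mem_enumerate_iff array 0 _).mpr ⟨x.toNat, by omega, by simp; omega⟩, ?_⟩
      simp only [decide_eq_true_eq]
      rw [PySem.List.pyGetD_eq_getElem array 0 h0 h1] at h2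
      exact h2
  refine ⟨rfl, ?_, ?_, ?_, ?_, ?_⟩
  · exact List.pairwise_map.mpr
      (List.Pairwise.filter _ (PySem.List.pairwise_lt_enumerate array 0))
  · intro p hp
    rcases (hmem p).mp hp with ⟨h0, h1, h2⟩
    exact ⟨h0, h1, h2⟩
  · intro j hj0 hj1 hlt
    by_contra hpos
    exact absurd (hlt j ((hmem j).mpr ⟨hj0, hj1, by omega⟩)) (by omega)
  · intro j _ _ _
    rfl
  · intro j hj0 hj1 hpos
    exact Or.inl ((hmem j).mpr ⟨hj0, hj1, hpos⟩)

-- ===== VERDICT (by name: the statement is the Claim_ definition above) =====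
theorem update_values_left_spec : Claim_equal_update_values_left := by
  intro array _
  show update_values_left array = update_values_left_alt array
  rw [update_values_left_eq, update_values_left_alt]
  exact main_lemma array _ 0 array _ rfl le_rfl (init_inv array)
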